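-- pv_equiv track=rewrite | github.com/brendenrossin/SecondBrain | src/secondbrain/scripts/inbox_processor.py | _ensure_task_category
-- ===== SOURCE A (Python) =====
-- def _ensure_task_category(content: str, category: str, task_line: str) -> str:
--     """Ensure ### category exists under ## Tasks, then append task."""
--     lines = content.split("\n")
--     tasks_idx = None
--     cat_idx = None
--     tasks_end = len(lines)
--
--     for i, ln in enumerate(lines):
--         if ln.strip() == "## Tasks":
--             tasks_idx = i
--             for j in range(i + 1, len(lines)):
--                 if lines[j].strip().startswith("## ") and not lines[j].strip().startswith("### "):
--                     tasks_end = j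
--                     break
--             break
--
--     if tasks_idx is None:
--         lines.append("")
--         lines.append("## Tasks")
--         lines.append(f"### {category}")
--         lines.append(task_line)
--         return "\n".join(lines)
--
--     for i in range(tasks_idx + 1, tasks_end):
--         if lines[i].strip() == f"### {category}":
--             cat_idx = i
--             break
--
--     if cat_idx is None:
--         lines.insert(tasks_end, f"### {category}")
--         lines.insert(tasks_end + 1, task_line)
--         return "\n".join(lines)
--
--     # Find end of category section
--     cat_end = tasks_end
--     for i in range(cat_idx + 1, tasks_end):
--         if lines[i].strip().startswith("### "):
--             cat_end = i
--             break
--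
--     lines.insert(cat_end, task_line)
--     return "\n".join(lines)
-- ===== SOURCE B (Python) =====
-- def _ensure_task_category(content: str, category: str, task_line: str) -> str:
--     """Single forward pass (state machine) instead of separate nested scans."""
--     lines = content.split("\n")
--     hdr = f"### {category}"
--     phase = 0  # 0: before Tasks, 1: in Tasks, 2: in category, 3: done scanning
--     tasks_idx = cat_idx = cat_end = tasks_end = None
--     for i, ln in enumerate(lines):
--         s = ln.strip()
--         if phase == 0:
--             if s == "## Tasks":
--                 tasks_idx = i
--                 phase = 1
--         elif phase == 1:
--             if s.startswith("## ") and not s.startswith("### "):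
--                 tasks_end = i
--                 phase = 3
--             elif s == hdr:
--                 cat_idx = i
--                 phase = 2
--         elif phase == 2:
--             if s.startswith("## ") and not s.startswith("### "):
--                 tasks_end = i
--                 phase = 3
--             elif s.startswith("### "):
--                 cat_end = i
--                 phase = 3
--     if tasks_idx is None:
--         return "\n".join(lines + ["", "## Tasks", hdr, task_line])
--     if tasks_end is None:
--         tasks_end = len(lines)
--     if cat_idx is None:
--         return "\n".join(lines[:tasks_end] + [hdr, task_line] + lines[tasks_end:])
--     if cat_end is None:
--         cat_end = tasks_end
--     return "\n".join(lines[:cat_end] + [task_line] + lines[cat_end:])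
-- ===== Notes on version B (the rewrite author's own statement) =====
-- stated objective: alternative
-- what changed: A's nested scans (an outer enumerate with an inner range scan for the Tasks-section end, then two more index-range scans for the category header and its end) are replaced by a single forward state-machine pass over the lines that records tasks_idx/tasks_end/cat_idx/cat_end in one traversal, and the result is assembled by list slicing instead of list.insert.
import Mathlib
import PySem

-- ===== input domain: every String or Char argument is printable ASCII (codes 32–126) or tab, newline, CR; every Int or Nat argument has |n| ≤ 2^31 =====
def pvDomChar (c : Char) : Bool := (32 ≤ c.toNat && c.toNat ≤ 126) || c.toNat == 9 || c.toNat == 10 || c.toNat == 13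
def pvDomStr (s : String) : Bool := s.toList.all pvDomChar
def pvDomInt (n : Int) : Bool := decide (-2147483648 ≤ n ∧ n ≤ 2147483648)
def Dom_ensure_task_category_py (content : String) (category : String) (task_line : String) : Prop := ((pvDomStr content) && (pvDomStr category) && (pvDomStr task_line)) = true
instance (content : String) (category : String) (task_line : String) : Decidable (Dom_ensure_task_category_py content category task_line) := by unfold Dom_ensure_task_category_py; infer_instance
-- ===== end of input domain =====

-- B replaces A's three separate (partly nested) index scans by one forward state-machine pass
-- recording tasks_idx/tasks_end/cat_idx/cat_end, and splices with slices instead of list.insert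
-- (objective: alternative decomposition, same O(n) cost); return values agree on all inputs.

-- ===== PORT A =====

def pvIsBound (l : String) : Bool :=
  PySem.Str.startswith (PySem.Str.strip l) "## " && !(PySem.Str.startswith (PySem.Str.strip l) "### ")

def pvInnerA (rest : List String) (j : Nat) (dflt : Nat) : Nat :=
  match rest with
  | [] => dflt
  | l :: ls => if pvIsBound l then j else pvInnerA ls (j + 1) dflt

def pvOuterA (rest : List String) (i : Nat) (len : Nat) : Option (Nat × Nat) :=
  match rest with
  | [] => none
  | l :: ls =>
    if PySem.Str.strip l == "## Tasks" then some (i, pvInnerA ls (i + 1) len)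
    else pvOuterA ls (i + 1) len

def pvCatA (rest : List String) (i : Nat) (te : Nat) (hdr : String) : Option Nat :=
  match rest with
  | [] => none
  | l :: ls =>
    if te ≤ i then none
    else if PySem.Str.strip l == hdr then some i else pvCatA ls (i + 1) te hdr

def pvCatEndA (rest : List String) (i : Nat) (te : Nat) : Nat :=
  match rest with
  | [] => te
  | l :: ls =>
    if te ≤ i then te
    else if PySem.Str.startswith (PySem.Str.strip l) "### " then i else pvCatEndA ls (i + 1) te

def ensure_task_category_py (content : String) (category : String) (task_line : String) : String :=
  let lines := (PySem.Str.split? content "\n").getD []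
  let len := lines.length
  match pvOuterA lines 0 len with
  | none =>
    PySem.Str.join "\n" (lines ++ ["", "## Tasks", "### " ++ category, task_line])
  | some (ti, te) =>
    match pvCatA (lines.drop (ti + 1)) (ti + 1) te ("### " ++ category) with
    | none =>
      PySem.Str.join "\n"
        (PySem.List.insert (PySem.List.insert lines (te : Int) ("### " ++ category)) ((te : Int) + 1) task_line)
    | some ci =>
      let ce := pvCatEndA (lines.drop (ci + 1)) (ci + 1) te
      PySem.Str.join "\n" (PySem.List.insert lines (ce : Int) task_line)

-- ===== PORT B =====

structure PvScanSt where
  phase : Nat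
  ti : Option Nat
  ci : Option Nat
  ce : Option Nat
  te : Option Nat

def pvStepB (cat : String) (st : PvScanSt) (p : Nat × String) : PvScanSt :=
  let s := PySem.Str.strip p.2
  if st.phase == 0 then
    (if s == "## Tasks" then { st with phase := 1, ti := some p.1 } else st)
  else if st.phase == 1 then
    (if PySem.Str.startswith s "## " && !(PySem.Str.startswith s "### ") then
       { st with phase := 3, te := some p.1 }
     else if s == "### " ++ cat then { st with phase := 2, ci := some p.1 }
     else st)
  else if st.phase == 2 then
    (if PySem.Str.startswith s "## " && !(PySem.Str.startswith s "### ") then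
       { st with phase := 3, te := some p.1 }
     else if PySem.Str.startswith s "### " then { st with phase := 3, ce := some p.1 }
     else st)
  else st

def pvScanB (cat : String) : List String → Nat → PvScanSt → PvScanSt
  | [], _, st => st
  | l :: ls, i, st => pvScanB cat ls (i + 1) (pvStepB cat st (i, l))

def ensure_task_category_py_alt (content : String) (category : String) (task_line : String) : String :=
  let lines := (PySem.Str.split? content "\n").getD []
  let hdr := "### " ++ category
  let st := pvScanB category lines 0 ⟨0, none, none, none, none⟩
  match st.ti with
  | none => PySem.Str.join "\n" (lines ++ ["", "## Tasks", hdr, task_line])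
  | some _ =>
    let te := st.te.getD lines.length
    match st.ci with
    | none => PySem.Str.join "\n" (lines.take te ++ [hdr, task_line] ++ lines.drop te)
    | some _ =>
      let ce := st.ce.getD te
      PySem.Str.join "\n" (lines.take ce ++ [task_line] ++ lines.drop ce)

-- ===== PRECONDITION & SPEC =====
def Spec_ensure_task_category_py (content : String) (category : String) (task_line : String) (out : String) : Prop := out = ensure_task_category_py_alt content category task_line
instance (content : String) (category : String) (task_line : String) (out : String) : Decidable (Spec_ensure_task_category_py content category task_line out) := by unfold Spec_ensure_task_category_py; infer_instance

-- ===== CLAIM (what is proved, stated in full; the proofs are below) =====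
def Claim_equal_ensure_task_category_py : Prop := ∀ (content : String) (category : String) (task_line : String), Dom_ensure_task_category_py content category task_line → Spec_ensure_task_category_py content category task_line (ensure_task_category_py content category task_line)

-- ===== LEMMAS AND PROOFS =====

theorem pvScanB_phase3 (cat : String) (ls : List String) (i : Nat) (st : PvScanSt)
    (h : st.phase = 3) : pvScanB cat ls i st = st := by
  induction ls generalizing i with
  | nil => rfl
  | cons l ls ih =>
    have hstep : pvStepB cat st (i, l) = st := by simp [pvStepB, h]
    rw [pvScanB, hstep, ih (i + 1)]

theorem le_pvInnerA (ls : List String) (j len : Nat) (h : j + ls.length = len) :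
    j ≤ pvInnerA ls j len := by
  induction ls generalizing j with
  | nil => simp only [pvInnerA]; omega
  | cons l ls ih =>
    rw [pvInnerA]
    split
    · exact le_refl _
    · have := ih (j + 1) (by simp only [List.length_cons] at h; omega)
      omega

theorem pvInnerA_le (ls : List String) (j len : Nat) (h : j + ls.length = len) :
    pvInnerA ls j len ≤ len := by
  induction ls generalizing j with
  | nil => simp only [pvInnerA]; omega
  | cons l ls ih =>
    rw [pvInnerA]
    split
    · simp only [List.length_cons] at h; omega
    · exact ih (j + 1) (by simp only [List.length_cons] at h; omega)

theorem pvCatEndA_le (ls : List String) (i te : Nat) : pvCatEndA ls i te ≤ te := by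
  induction ls generalizing i with
  | nil => simp [pvCatEndA]
  | cons l ls ih =>
    rw [pvCatEndA]
    split
    · exact le_refl _
    · split
      · omega
      · exact ih (i + 1)

theorem pvScanB_phase2 (cat : String) (ls : List String) (i len : Nat)
    (h : i + ls.length = len) (ti ci : Nat) :
    (pvScanB cat ls i ⟨2, some ti, some ci, none, none⟩).ti = some ti ∧
    (pvScanB cat ls i ⟨2, some ti, some ci, none, none⟩).ci = some ci ∧
    ((pvScanB cat ls i ⟨2, some ti, some ci, none, none⟩).ce.getD
        ((pvScanB cat ls i ⟨2, some ti, some ci, none, none⟩).te.getD len))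
      = pvCatEndA ls i (pvInnerA ls i len) := by
  induction ls generalizing i with
  | nil =>
    simp only [List.length_nil] at h
    simp [pvScanB, pvInnerA, pvCatEndA]
  | cons l ls ih =>
    have hlen' : (i + 1) + ls.length = len := by simp only [List.length_cons] at h; omega
    rw [pvScanB]
    by_cases h2 : PySem.Str.startswith (PySem.Str.strip l) "### "
    all_goals simp at h2
    · -- sub line; not a boundary
      have hstep : pvStepB cat ⟨2, some ti, some ci, none, none⟩ (i, l)
          = ⟨3, some ti, some ci, some i, none⟩ := by
        simp [pvStepB, h2]
      rw [hstep, pvScanB_phase3 cat ls (i + 1) _ rfl]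
      have hte : pvInnerA (l :: ls) i len = pvInnerA ls (i + 1) len := by
        rw [pvInnerA]; simp [pvIsBound, h2]
      have hlt : i < pvInnerA (l :: ls) i len := by
        rw [hte]; have := le_pvInnerA ls (i + 1) len hlen'; omega
      refine ⟨rfl, rfl, ?_⟩
      rw [pvCatEndA]
      simp [h2, Nat.not_le.mpr hlt]
    · by_cases h1 : PySem.Str.startswith (PySem.Str.strip l) "## "
      all_goals simp at h1
      · -- boundary
        have hstep : pvStepB cat ⟨2, some ti, some ci, none, none⟩ (i, l)
            = ⟨3, some ti, some ci, none, some i⟩ := by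
          simp [pvStepB, h1, h2]
        rw [hstep, pvScanB_phase3 cat ls (i + 1) _ rfl]
        have hte : pvInnerA (l :: ls) i len = i := by
          rw [pvInnerA]; simp [pvIsBound, h1, h2]
        refine ⟨rfl, rfl, ?_⟩
        rw [hte, pvCatEndA]
        simp
      · -- plain line
        have hstep : pvStepB cat ⟨2, some ti, some ci, none, none⟩ (i, l)
            = ⟨2, some ti, some ci, none, none⟩ := by
          simp [pvStepB, h1, h2]
        rw [hstep]
        have hte : pvInnerA (l :: ls) i len = pvInnerA ls (i + 1) len := by
          rw [pvInnerA]; simp [pvIsBound, h1]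
        have hlt : i < pvInnerA (l :: ls) i len := by
          rw [hte]; have := le_pvInnerA ls (i + 1) len hlen'; omega
        obtain ⟨g1, g2, g3⟩ := ih (i + 1) hlen'
        refine ⟨g1, g2, ?_⟩
        rw [pvCatEndA, hte, g3]
        rw [hte] at hlt
        simp [h2, Nat.not_le.mpr hlt]

theorem pvScanB_phase1 (cat : String) (ls : List String) (i len : Nat)
    (h : i + ls.length = len) (ti : Nat) :
    (pvScanB cat ls i ⟨1, some ti, none, none, none⟩).ti = some ti ∧
    (match pvCatA ls i (pvInnerA ls i len) ("### " ++ cat) with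
     | none =>
        (pvScanB cat ls i ⟨1, some ti, none, none, none⟩).ci = none ∧
        (pvScanB cat ls i ⟨1, some ti, none, none, none⟩).te.getD len = pvInnerA ls i len
     | some ci =>
        i ≤ ci ∧
        (pvScanB cat ls i ⟨1, some ti, none, none, none⟩).ci = some ci ∧
        ((pvScanB cat ls i ⟨1, some ti, none, none, none⟩).ce.getD
            ((pvScanB cat ls i ⟨1, some ti, none, none, none⟩).te.getD len))
          = pvCatEndA (ls.drop (ci + 1 - i)) (ci + 1) (pvInnerA ls i len)) := by
  induction ls generalizing i with
  | nil =>
    simp only [List.length_nil] at h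
    simp [pvScanB, pvInnerA, pvCatA]
  | cons l ls ih =>
    have hlen' : (i + 1) + ls.length = len := by simp only [List.length_cons] at h; omega
    by_cases h2 : PySem.Str.startswith (PySem.Str.strip l) "### "
    all_goals simp at h2
    · -- sub line, not a boundary
      have hte : pvInnerA (l :: ls) i len = pvInnerA ls (i + 1) len := by
        rw [pvInnerA]; simp [pvIsBound, h2]
      have hlt : i < pvInnerA (l :: ls) i len := by
        rw [hte]; have := le_pvInnerA ls (i + 1) len hlen'; omega
      by_cases hc : PySem.Str.strip l == "### " ++ cat
      · have hcat : pvCatA (l :: ls) i (pvInnerA (l :: ls) i len) ("### " ++ cat) = some i := by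
          rw [pvCatA]; simp [Nat.not_le.mpr hlt, hc]
        rw [hcat]
        have hstep : pvStepB cat ⟨1, some ti, none, none, none⟩ (i, l)
            = ⟨2, some ti, some i, none, none⟩ := by
          simp [pvStepB, h2]
          simpa using hc
        rw [pvScanB, hstep]
        obtain ⟨g1, g2, g3⟩ := pvScanB_phase2 cat ls (i + 1) len hlen' ti i
        exact ⟨g1, le_refl _, g2, by rw [g3, hte]; simp⟩
      · have hcat : pvCatA (l :: ls) i (pvInnerA (l :: ls) i len) ("### " ++ cat)
            = pvCatA ls (i + 1) (pvInnerA (l :: ls) i len) ("### " ++ cat) := by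
          rw [pvCatA]; simp [Nat.not_le.mpr hlt, hc]
        have hstep : pvStepB cat ⟨1, some ti, none, none, none⟩ (i, l)
            = ⟨1, some ti, none, none, none⟩ := by
          simp [pvStepB, h2]
          simpa using hc
        rw [pvScanB, hstep, hcat, hte]
        obtain ⟨g1, g2⟩ := ih (i + 1) hlen'
        refine ⟨g1, ?_⟩
        cases hca : pvCatA ls (i + 1) (pvInnerA ls (i + 1) len) ("### " ++ cat) with
        | none => rw [hca] at g2; exact g2
        | some ci =>
          rw [hca] at g2
          obtain ⟨g3, g4, g5⟩ := g2
          refine ⟨by omega, g4, ?_⟩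
          rw [g5]
          have : (l :: ls).drop (ci + 1 - i) = ls.drop (ci + 1 - (i + 1)) := by
            have : ci + 1 - i = (ci + 1 - (i + 1)) + 1 := by omega
            rw [this, List.drop_succ_cons]
          rw [this]
    · by_cases h1 : PySem.Str.startswith (PySem.Str.strip l) "## "
      all_goals simp at h1
      · -- boundary line
        have hte : pvInnerA (l :: ls) i len = i := by
          rw [pvInnerA]; simp [pvIsBound, h1, h2]
        have hcat : pvCatA (l :: ls) i (pvInnerA (l :: ls) i len) ("### " ++ cat) = none := by
          rw [pvCatA]; simp [hte]
        rw [hcat]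
        have hstep : pvStepB cat ⟨1, some ti, none, none, none⟩ (i, l)
            = ⟨3, some ti, none, none, some i⟩ := by
          simp [pvStepB, h1, h2]
        rw [pvScanB, hstep, pvScanB_phase3 cat ls (i + 1) _ rfl, hte]
        exact ⟨rfl, rfl, rfl⟩
      · -- plain line
        have hte : pvInnerA (l :: ls) i len = pvInnerA ls (i + 1) len := by
          rw [pvInnerA]; simp [pvIsBound, h1]
        have hlt : i < pvInnerA (l :: ls) i len := by
          rw [hte]; have := le_pvInnerA ls (i + 1) len hlen'; omega
        by_cases hc : PySem.Str.strip l == "### " ++ cat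
        · have hcat : pvCatA (l :: ls) i (pvInnerA (l :: ls) i len) ("### " ++ cat) = some i := by
            rw [pvCatA]; simp [Nat.not_le.mpr hlt, hc]
          rw [hcat]
          have hstep : pvStepB cat ⟨1, some ti, none, none, none⟩ (i, l)
              = ⟨2, some ti, some i, none, none⟩ := by
            simp [pvStepB, h1, h2]
            simpa using hc
          rw [pvScanB, hstep]
          obtain ⟨g1, g2, g3⟩ := pvScanB_phase2 cat ls (i + 1) len hlen' ti i
          exact ⟨g1, le_refl _, g2, by rw [g3, hte]; simp⟩
        · have hcat : pvCatA (l :: ls) i (pvInnerA (l :: ls) i len) ("### " ++ cat)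
              = pvCatA ls (i + 1) (pvInnerA (l :: ls) i len) ("### " ++ cat) := by
            rw [pvCatA]; simp [Nat.not_le.mpr hlt, hc]
          have hstep : pvStepB cat ⟨1, some ti, none, none, none⟩ (i, l)
              = ⟨1, some ti, none, none, none⟩ := by
            simp [pvStepB, h1, h2]
            simpa using hc
          rw [pvScanB, hstep, hcat, hte]
          obtain ⟨g1, g2⟩ := ih (i + 1) hlen'
          refine ⟨g1, ?_⟩
          cases hca : pvCatA ls (i + 1) (pvInnerA ls (i + 1) len) ("### " ++ cat) with
          | none => rw [hca] at g2; exact g2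
          | some ci =>
            rw [hca] at g2
            obtain ⟨g3, g4, g5⟩ := g2
            refine ⟨by omega, g4, ?_⟩
            rw [g5]
            have : (l :: ls).drop (ci + 1 - i) = ls.drop (ci + 1 - (i + 1)) := by
              have : ci + 1 - i = (ci + 1 - (i + 1)) + 1 := by omega
              rw [this, List.drop_succ_cons]
            rw [this]

theorem pvOuterA_none_scan (cat : String) (ls : List String) (i len : Nat)
    (h : pvOuterA ls i len = none) :
    pvScanB cat ls i ⟨0, none, none, none, none⟩ = ⟨0, none, none, none, none⟩ := by
  induction ls generalizing i with
  | nil => rfl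
  | cons l ls ih =>
    rw [pvOuterA] at h
    by_cases ht : PySem.Str.strip l == "## Tasks"
    · simp [ht] at h
    · simp only [ht] at h
      have hstep : pvStepB cat ⟨0, none, none, none, none⟩ (i, l) = ⟨0, none, none, none, none⟩ := by
        simp [pvStepB]
        simpa using ht
      rw [pvScanB, hstep, ih (i + 1) h]

theorem pvOuterA_some_scan (cat : String) (ls : List String) (i len : Nat) (ti te : Nat)
    (h : pvOuterA ls i len = some (ti, te)) :
    i ≤ ti ∧ ti < i + ls.length ∧
    te = pvInnerA (ls.drop (ti + 1 - i)) (ti + 1) len ∧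
    pvScanB cat ls i ⟨0, none, none, none, none⟩
      = pvScanB cat (ls.drop (ti + 1 - i)) (ti + 1) ⟨1, some ti, none, none, none⟩ := by
  induction ls generalizing i with
  | nil => simp [pvOuterA] at h
  | cons l ls ih =>
    rw [pvOuterA] at h
    by_cases ht : PySem.Str.strip l == "## Tasks"
    · simp only [ht, if_true, Option.some.injEq, Prod.mk.injEq] at h
      obtain ⟨h1, h2⟩ := h
      subst h1; subst h2
      have hdrop : (l :: ls).drop (i + 1 - i) = ls := by
        have : i + 1 - i = 1 := by omega
        rw [this, List.drop_one, List.tail_cons]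
      refine ⟨le_refl _, by simp, by rw [hdrop], ?_⟩
      have hstep : pvStepB cat ⟨0, none, none, none, none⟩ (i, l)
          = ⟨1, some i, none, none, none⟩ := by
        simp [pvStepB]
        simpa using ht
      rw [pvScanB, hstep, hdrop]
    · simp only [ht] at h
      obtain ⟨h1, h2, h3, h4⟩ := ih (i + 1) h
      have hdrop : (l :: ls).drop (ti + 1 - i) = ls.drop (ti + 1 - (i + 1)) := by
        have : ti + 1 - i = (ti + 1 - (i + 1)) + 1 := by omega
        rw [this, List.drop_succ_cons]
      have hstep : pvStepB cat ⟨0, none, none, none, none⟩ (i, l) = ⟨0, none, none, none, none⟩ := by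
        simp [pvStepB]
        simpa using ht
      refine ⟨by omega, by simp only [List.length_cons]; omega, by rw [hdrop]; exact h3, ?_⟩
      rw [pvScanB, hstep, h4, hdrop]

theorem pv_main (content category task_line : String) :
    ensure_task_category_py content category task_line
      = ensure_task_category_py_alt content category task_line := by
  unfold ensure_task_category_py ensure_task_category_py_alt
  set L : List String := (PySem.Str.split? content "\n").getD [] with hL
  dsimp only
  cases ho : pvOuterA L 0 L.length with
  | none =>
    rw [pvOuterA_none_scan category L 0 L.length ho]
  | some p =>
    obtain ⟨ti, te⟩ := p
    obtain ⟨-, hlt, hte, hscan⟩ := pvOuterA_some_scan category L 0 L.length ti te ho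
    simp only [Nat.sub_zero] at hte hscan
    have hlen1 : (ti + 1) + (L.drop (ti + 1)).length = L.length := by
      rw [List.length_drop]; omega
    obtain ⟨g1, g2⟩ := pvScanB_phase1 category (L.drop (ti + 1)) (ti + 1) L.length hlen1 ti
    rw [hscan, g1]
    dsimp only
    have hteL : te ≤ L.length := by
      rw [hte]; exact pvInnerA_le _ _ _ hlen1
    cases hca : pvCatA (L.drop (ti + 1)) (ti + 1) (pvInnerA (L.drop (ti + 1)) (ti + 1) L.length)
        ("### " ++ category) with
    | none =>
      rw [hca] at g2
      obtain ⟨g3, g4⟩ := g2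
      rw [← hte] at hca
      rw [hca, g3, g4, ← hte]
      dsimp only
      -- list equality
      have e1 : PySem.List.insert L (te : Int) ("### " ++ category)
          = L.take te ++ ("### " ++ category) :: L.drop te :=
        PySem.List.insert_natCast L te _ hteL
      have hlen2 : (L.take te ++ ("### " ++ category) :: L.drop te).length = L.length + 1 := by
        simp
      have e2 : PySem.List.insert (L.take te ++ ("### " ++ category) :: L.drop te)
            ((te : Int) + 1) task_line
          = L.take te ++ ("### " ++ category) :: task_line :: L.drop te := by
        have : ((te : Int) + 1) = ((te + 1 : Nat) : Int) := by push_cast; ring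
        rw [this, PySem.List.insert_natCast _ _ _ (by omega)]
        have htk : (L.take te ++ ("### " ++ category) :: L.drop te).take (te + 1)
            = L.take te ++ [("### " ++ category)] := by
          have hlt2 : (L.take te).length = te := by simp [List.length_take]; omega
          rw [show te + 1 = (L.take te).length + 1 by rw [hlt2], List.take_append]
          simp
        have hdp : (L.take te ++ ("### " ++ category) :: L.drop te).drop (te + 1) = L.drop te := by
          have hlt2 : (L.take te).length = te := by simp [List.length_take]; omega
          rw [show te + 1 = (L.take te).length + 1 by rw [hlt2], List.drop_append]
          simp
        rw [htk, hdp]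
        simp
      rw [e1, e2]
      simp
    | some ci =>
      rw [hca] at g2
      obtain ⟨g3, g4, g5⟩ := g2
      rw [← hte] at hca
      rw [hca, g4, g5, ← hte]
      dsimp only
      have hdd : (L.drop (ti + 1)).drop (ci + 1 - (ti + 1)) = L.drop (ci + 1) := by
        rw [List.drop_drop]
        congr 1
        omega
      rw [hdd]
      have hce : pvCatEndA (L.drop (ci + 1)) (ci + 1) te ≤ L.length :=
        le_trans (pvCatEndA_le _ _ _) hteL
      rw [PySem.List.insert_natCast _ _ _ hce]
      simp

-- ===== VERDICT (by name: the statement is the Claim_ definition above) =====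
theorem ensure_task_category_py_spec : Claim_equal_ensure_task_category_py := by
  intro content category task_line _
  unfold Spec_ensure_task_category_py
  exact pv_main content category task_line
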